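-- pv_equiv track=rewrite | github.com/anifilm/workspace | _study/COS_PRO_1/python/stage1/4.py | solution
-- ===== SOURCE A (Python) =====
-- def solution(num):
--     num += 1
--     str_num = str(num)[::-1]
--     j, k = 0, 1
--     for i in str_num:
--         if i == '0':
--             j += k
--             k *= 10
--     answer = num + j
--     return answer
-- ===== SOURCE B (Python) =====
-- def solution(num):
--     num += 1
--     z = str(num).count('0')
--     return num + (10 ** z - 1) // 9
-- ===== Notes on version B (the rewrite author's own statement) =====
-- stated objective: simpler
-- what changed: Replaced the reversed-string accumulation loop (adding 1,10,100,... per zero digit) by counting zero digits and adding the closed-form repunit (10**z - 1)//9.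
import Mathlib
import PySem

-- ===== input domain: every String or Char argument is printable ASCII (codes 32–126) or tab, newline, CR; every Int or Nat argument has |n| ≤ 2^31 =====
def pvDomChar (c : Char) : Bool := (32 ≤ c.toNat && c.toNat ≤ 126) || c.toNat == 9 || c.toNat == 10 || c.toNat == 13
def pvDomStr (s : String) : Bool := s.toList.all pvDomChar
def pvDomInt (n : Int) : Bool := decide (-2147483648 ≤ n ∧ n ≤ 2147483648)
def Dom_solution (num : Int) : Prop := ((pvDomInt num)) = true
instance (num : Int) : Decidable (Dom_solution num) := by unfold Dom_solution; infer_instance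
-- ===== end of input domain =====

-- B replaces A's reversed-string accumulation loop by counting zero digits and adding the closed-form repunit; objective: simpler.

-- ===== PORT A =====
def solution (num : Int) : Int :=
  let num := num + 1
  let str_num := ((PySem.Str.slice? (PySem.Int.toStr num) none none (-1)).getD "").toList
  let jk := str_num.foldl
    (fun (jk : Int × Int) i => if i == '0' then (jk.1 + jk.2, jk.2 * 10) else jk) (0, 1)
  num + jk.1

-- ===== PORT B =====
def solution_alt (num : Int) : Int :=
  let num := num + 1
  let z := PySem.Str.count (PySem.Int.toStr num) "0"
  num + PySem.Int.floordiv (10 ^ z - 1) 9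

-- ===== PRECONDITION & SPEC =====
def Spec_solution (num : Int) (out : Int) : Prop := out = solution_alt num
instance (num : Int) (out : Int) : Decidable (Spec_solution num out) := by unfold Spec_solution; infer_instance

-- ===== CLAIM (what is proved, stated in full; the proofs are below) =====
def Claim_equal_solution : Prop := ∀ (num : Int), Dom_solution num → Spec_solution num (solution num)

-- ===== LEMMAS AND PROOFS =====

-- the repunit with n ones, as A's loop accumulates it
def rep : Nat → Int
  | 0 => 0
  | n + 1 => 1 + 10 * rep n

theorem rep_mul_nine (n : Nat) : 9 * rep n = 10 ^ n - 1 := by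
  induction n with
  | zero => simp [rep]
  | succ n ih => simp only [rep, pow_succ]; ring_nf; ring_nf at ih; omega

theorem foldl_jk (l : List Char) (j k : Int) :
    (l.foldl (fun (jk : Int × Int) i => if i == '0' then (jk.1 + jk.2, jk.2 * 10) else jk) (j, k)).1
      = j + k * rep (l.count '0') := by
  induction l generalizing j k with
  | nil => simp [rep]
  | cons h t ih =>
    rw [List.foldl_cons]
    by_cases hc : h = '0'
    · subst hc
      rw [if_pos (by simp), ih, List.count_cons_self]
      simp only [rep]; ring
    · rw [if_neg (by simp [hc]), ih, List.count_cons_of_ne hc]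

theorem count_go_single (c : Char) (l : List Char) (acc fuel : Nat) (h : l.length ≤ fuel) :
    PySem.Chars.count.go [c] fuel l acc = acc + l.count c := by
  induction l generalizing acc fuel with
  | nil => cases fuel <;> simp [PySem.Chars.count.go]
  | cons x t ih =>
    cases fuel with
    | zero => simp at h
    | succ fuel =>
      simp only [PySem.Chars.count.go]
      by_cases hc : c = x
      · subst hc
        rw [if_pos (by simp [List.isPrefixOf])]
        simp only [List.length_cons] at h
        rw [show ([c] : List Char).length = 1 from rfl, List.drop_one, List.tail_cons,
          ih _ _ (by omega), List.count_cons_self]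
        omega
      · rw [if_neg (by simp [List.isPrefixOf, hc])]
        simp only [List.length_cons] at h
        rw [ih _ _ (by omega), List.count_cons_of_ne (Ne.symm hc)]

theorem chars_count_single (c : Char) (l : List Char) :
    PySem.Chars.count l [c] = l.count c := by
  simpa using count_go_single c l 0 l.length le_rfl

-- ===== VERDICT (by name: the statement is the Claim_ definition above) =====
theorem solution_spec : Claim_equal_solution := by
  intro num _
  show _ = _
  simp only [solution, solution_alt, PySem.Str.slice?_none_none_neg_one, Option.getD_some]
  rw [PySem.Str.count_eq]
  have hts : (String.ofList (PySem.Int.toStr (num + 1)).toList.reverse).toList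
      = (PySem.Int.toStr (num + 1)).toList.reverse := by
    exact String.toList_ofList
  rw [hts, foldl_jk, PySem.Int.floordiv_eq_ediv_of_pos (by norm_num)]
  have h9 : (9 : Int) * rep ((PySem.Int.toStr (num + 1)).toList.count '0')
      = 10 ^ ((PySem.Int.toStr (num + 1)).toList.count '0') - 1 := rep_mul_nine _
  have : ("0" : String).toList = ['0'] := rfl
  rw [this, chars_count_single, List.count_reverse]
  omega
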